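-- pv_equiv track=rewrite | github.com/daiant/Algoritmica | spellsuggest.py | intermedia
-- ===== SOURCE A (Python) =====
-- def intermedia(a, b, threshold=None):
--     CTE = 3
--     d=dict()
--     for i in range(len(a)+1):
--         d[i]=dict()
--         d[i][0] = i
--     for j in range(len(b)+1):
--         d[0][j] = j
--     for i in range(1, len(a)+1):
--         for j in range(1, len(b)+1):
--             d[i][j] = min(d[i-1][j]  + 1,                             #borrado
--                          d[i][j-1]   + 1,                             #insercion
--                          d[i-1][j-1] + (not a[i-1]==b[j-1]))          #sustitucion
--             if i>1 and j>1 and a[i-2] == b[j-1] and a[i-1] == b[j-2]: # condición restringida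
--                     d[i][j] = min(d[i][j], d[i-2][j-2] + 1)
--             if i>2 and j>1 and a[i-3] == b[j-1] and a[i-1] == b[j-2]: # condición intermedia
--                     d[i][j] = min(d[i][j], d[i-3][j-2] + 2)
--             if i>1 and j>2 and a[i-1] == b[j-3] and a[i-2] == b[j-1]: # condición intermedia
--                     d[i][j] = min(d[i][j], d[i-2][j-3] + 2)
--     dist = d[len(a)][len(b)]
--     return dist if dist <= threshold else None ## Esto necesita mejora pero lo ponemos porque mira
-- ===== SOURCE B (Python) =====
-- def intermedia(a, b, threshold=None):
--     # top-down memoized recursion over the same restricted Damerau-Levenshtein recurrence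
--     memo = {}
--
--     def rec(i, j):
--         if i == 0:
--             return j
--         if j == 0:
--             return i
--         if (i, j) in memo:
--             return memo[(i, j)]
--         best = min(rec(i - 1, j) + 1,
--                    rec(i, j - 1) + 1,
--                    rec(i - 1, j - 1) + (a[i - 1] != b[j - 1]))
--         if i > 1 and j > 1 and a[i - 2] == b[j - 1] and a[i - 1] == b[j - 2]:
--             best = min(best, rec(i - 2, j - 2) + 1)
--         if i > 2 and j > 1 and a[i - 3] == b[j - 1] and a[i - 1] == b[j - 2]:
--             best = min(best, rec(i - 3, j - 2) + 2)
--         if i > 1 and j > 2 and a[i - 1] == b[j - 3] and a[i - 2] == b[j - 1]: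
--             best = min(best, rec(i - 2, j - 3) + 2)
--         memo[(i, j)] = best
--         return best
--
--     dist = rec(len(a), len(b))
--     return dist if dist <= threshold else None
-- ===== Notes on version B (the rewrite author's own statement) =====
-- stated objective: alternative
-- what changed: Replaced A's bottom-up table filling (three setup loops plus nested i/j loops over a dict-of-dicts) by demand-driven top-down memoized recursion: a helper rec(i,j) with base cases and the same recurrence, caching each (i,j) in a memo dict.
import Mathlib
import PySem

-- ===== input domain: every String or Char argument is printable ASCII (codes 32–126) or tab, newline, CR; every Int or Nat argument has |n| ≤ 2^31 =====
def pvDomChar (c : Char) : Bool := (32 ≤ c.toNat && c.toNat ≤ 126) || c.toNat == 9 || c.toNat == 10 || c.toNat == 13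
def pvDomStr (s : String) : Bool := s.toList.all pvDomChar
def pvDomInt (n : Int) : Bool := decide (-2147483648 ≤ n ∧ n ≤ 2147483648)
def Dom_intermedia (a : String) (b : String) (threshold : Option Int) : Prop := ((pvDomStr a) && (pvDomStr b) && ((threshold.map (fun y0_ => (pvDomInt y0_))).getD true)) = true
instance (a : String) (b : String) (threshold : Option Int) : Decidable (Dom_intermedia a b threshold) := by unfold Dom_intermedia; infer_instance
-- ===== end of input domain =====

set_option maxHeartbeats 1000000


-- B replaces A's bottom-up table filling by top-down memoized recursion on the same recurrence (different decomposition, same cost).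

-- ===== PORT A =====
-- d[i][j] read with defaults: every read the Python performs is of a key that is present.
def pvGetCell (d : PySem.Dict Int (PySem.Dict Int Int)) (i j : Int) : Int :=
  (d.getD i PySem.Dict.empty).getD j 0

def pvSetCell (d : PySem.Dict Int (PySem.Dict Int Int)) (i j v : Int) : PySem.Dict Int (PySem.Dict Int Int) :=
  d.insert i ((d.getD i PySem.Dict.empty).insert j v)

-- body of A's inner loop (one (i,j) cell update, three conditional transposition refinements)
def pvAStep (as bs : List Char) (i : Int) (d : PySem.Dict Int (PySem.Dict Int Int)) (j : Int) :
    PySem.Dict Int (PySem.Dict Int Int) :=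
  let d := pvSetCell d i j (min (min (pvGetCell d (i-1) j + 1) (pvGetCell d i (j-1) + 1))
      (pvGetCell d (i-1) (j-1) +
        (if PySem.List.pyGetD as (i-1) ' ' == PySem.List.pyGetD bs (j-1) ' ' then 0 else 1)))
  let d := if i > 1 ∧ j > 1 ∧ PySem.List.pyGetD as (i-2) ' ' == PySem.List.pyGetD bs (j-1) ' '
              ∧ PySem.List.pyGetD as (i-1) ' ' == PySem.List.pyGetD bs (j-2) ' '
    then pvSetCell d i j (min (pvGetCell d i j) (pvGetCell d (i-2) (j-2) + 1)) else d
  let d := if i > 2 ∧ j > 1 ∧ PySem.List.pyGetD as (i-3) ' ' == PySem.List.pyGetD bs (j-1) ' '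
              ∧ PySem.List.pyGetD as (i-1) ' ' == PySem.List.pyGetD bs (j-2) ' '
    then pvSetCell d i j (min (pvGetCell d i j) (pvGetCell d (i-3) (j-2) + 2)) else d
  let d := if i > 1 ∧ j > 2 ∧ PySem.List.pyGetD as (i-1) ' ' == PySem.List.pyGetD bs (j-3) ' '
              ∧ PySem.List.pyGetD as (i-2) ' ' == PySem.List.pyGetD bs (j-1) ' '
    then pvSetCell d i j (min (pvGetCell d i j) (pvGetCell d (i-2) (j-3) + 2)) else d
  d

def intermedia (a : String) (b : String) (threshold : Option Int) : Option Int :=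
  let as := a.toList
  let bs := b.toList
  let la : Int := as.length
  let lb : Int := bs.length
  let d := (PySem.List.pyRange 0 (la+1) 1).foldl
      (fun d i => d.insert i (PySem.Dict.empty.insert 0 i)) PySem.Dict.empty
  let d := (PySem.List.pyRange 0 (lb+1) 1).foldl
      (fun d j => d.insert 0 ((d.getD 0 PySem.Dict.empty).insert j j)) d
  let d := (PySem.List.pyRange 1 (la+1) 1).foldl
      (fun d i => (PySem.List.pyRange 1 (lb+1) 1).foldl (pvAStep as bs i) d) d
  let dist := pvGetCell d la lb
  match threshold with          -- 'dist <= threshold' raises TypeError for threshold=None: excluded by Pre_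
  | some t => if dist ≤ t then some dist else none
  | none => none

-- ===== PORT B =====
-- rec(i, j) with its memo dict threaded through.  'fuel' is only a structural-termination guard
-- (intermedia_alt supplies enough for every call); rec is only ever called with 0 ≤ i, j, so the
-- 'i ≤ 0' / 'j ≤ 0' tests coincide with Python's 'i == 0' / 'j == 0'.
def pvRec (as bs : List Char) (fuel : Nat) (i j : Int) (memo : PySem.Dict (Int × Int) Int) :
    Int × PySem.Dict (Int × Int) Int :=
  match fuel with
  | 0 => (0, memo)
  | fuel + 1 =>
    if i ≤ 0 then (j, memo)
    else if j ≤ 0 then (i, memo)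
    else match memo.get? (i, j) with
    | some v => (v, memo)
    | none =>
      let r1 := pvRec as bs fuel (i-1) j memo
      let r2 := pvRec as bs fuel i (j-1) r1.2
      let r3 := pvRec as bs fuel (i-1) (j-1) r2.2
      let best := min (min (r1.1 + 1) (r2.1 + 1))
          (r3.1 + (if PySem.List.pyGetD as (i-1) ' ' == PySem.List.pyGetD bs (j-1) ' ' then 0 else 1))
      let s4 := if i > 1 ∧ j > 1 ∧ PySem.List.pyGetD as (i-2) ' ' == PySem.List.pyGetD bs (j-1) ' '
                  ∧ PySem.List.pyGetD as (i-1) ' ' == PySem.List.pyGetD bs (j-2) ' '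
        then (let r4 := pvRec as bs fuel (i-2) (j-2) r3.2; (min best (r4.1 + 1), r4.2))
        else (best, r3.2)
      let s5 := if i > 2 ∧ j > 1 ∧ PySem.List.pyGetD as (i-3) ' ' == PySem.List.pyGetD bs (j-1) ' '
                  ∧ PySem.List.pyGetD as (i-1) ' ' == PySem.List.pyGetD bs (j-2) ' '
        then (let r5 := pvRec as bs fuel (i-3) (j-2) s4.2; (min s4.1 (r5.1 + 2), r5.2))
        else s4
      let s6 := if i > 1 ∧ j > 2 ∧ PySem.List.pyGetD as (i-1) ' ' == PySem.List.pyGetD bs (j-3) ' '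
                  ∧ PySem.List.pyGetD as (i-2) ' ' == PySem.List.pyGetD bs (j-1) ' '
        then (let r6 := pvRec as bs fuel (i-2) (j-3) s5.2; (min s5.1 (r6.1 + 2), r6.2))
        else s5
      (s6.1, s6.2.insert (i, j) s6.1)

def intermedia_alt (a : String) (b : String) (threshold : Option Int) : Option Int :=
  let as := a.toList
  let bs := b.toList
  let dist := (pvRec as bs (as.length + bs.length + 1) as.length bs.length PySem.Dict.empty).1
  match threshold with          -- same final line as A: TypeError for threshold=None, excluded by Pre_
  | some t => if dist ≤ t then some dist else none
  | none => none

-- ===== PRECONDITION & SPEC =====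
-- Pre_ excludes only threshold=None, where 'dist <= threshold' raises TypeError in both A and B.
def Pre_intermedia (a : String) (b : String) (threshold : Option Int) : Prop :=
  threshold.isSome = true
instance (a : String) (b : String) (threshold : Option Int) : Decidable (Pre_intermedia a b threshold) := by
  unfold Pre_intermedia; infer_instance

def pvWitness_intermedia : String × String × Option Int := ("tapa", "pata", some 3)

def Spec_intermedia (a : String) (b : String) (threshold : Option Int) (out : Option Int) : Prop :=
  out = intermedia_alt a b threshold
instance (a : String) (b : String) (threshold : Option Int) (out : Option Int) : Decidable (Spec_intermedia a b threshold out) := by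
  unfold Spec_intermedia; infer_instance

-- ===== CLAIM (what is proved, stated in full; the proofs are below) =====
def Claim_equal_intermedia : Prop := ∀ (a : String) (b : String) (threshold : Option Int), Dom_intermedia a b threshold → Pre_intermedia a b threshold → Spec_intermedia a b threshold (intermedia a b threshold)

-- ===== LEMMAS AND PROOFS =====

-- the restricted Damerau-Levenshtein recurrence both programs compute
-- one application of the recurrence body to already-computed subresults v1..v6
def pvStage (as bs : List Char) (i j v1 v2 v3 v4 v5 v6 : Int) : Int :=
  let v := min (min (v1 + 1) (v2 + 1))
      (v3 + (if PySem.List.pyGetD as (i-1) ' ' == PySem.List.pyGetD bs (j-1) ' ' then 0 else 1))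
  let v := if i > 1 ∧ j > 1 ∧ PySem.List.pyGetD as (i-2) ' ' == PySem.List.pyGetD bs (j-1) ' '
              ∧ PySem.List.pyGetD as (i-1) ' ' == PySem.List.pyGetD bs (j-2) ' '
    then min v (v4 + 1) else v
  let v := if i > 2 ∧ j > 1 ∧ PySem.List.pyGetD as (i-3) ' ' == PySem.List.pyGetD bs (j-1) ' '
              ∧ PySem.List.pyGetD as (i-1) ' ' == PySem.List.pyGetD bs (j-2) ' '
    then min v (v5 + 2) else v
  let v := if i > 1 ∧ j > 2 ∧ PySem.List.pyGetD as (i-1) ' ' == PySem.List.pyGetD bs (j-3) ' '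
              ∧ PySem.List.pyGetD as (i-2) ' ' == PySem.List.pyGetD bs (j-1) ' '
    then min v (v6 + 2) else v
  v

def pvDL (as bs : List Char) (i j : Int) : Int :=
  if i <= 0 then j
  else if j <= 0 then i
  else pvStage as bs i j (pvDL as bs (i-1) j) (pvDL as bs i (j-1)) (pvDL as bs (i-1) (j-1))
      (pvDL as bs (i-2) (j-2)) (pvDL as bs (i-3) (j-2)) (pvDL as bs (i-2) (j-3))
termination_by (i + j).toNat
decreasing_by all_goals omega

theorem pvDL_zero (as bs : List Char) (j : Int) : pvDL as bs 0 j = j := by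
  rw [pvDL]; simp

theorem pvDL_base (as bs : List Char) (i : Int) (hi : 1 <= i) : pvDL as bs i 0 = i := by
  rw [pvDL]; rw [if_neg (by omega)]; simp

-- ===== B side: the memoized recursion computes pvDL =====
def pvMemoOK (as bs : List Char) (memo : PySem.Dict (Int × Int) Int) : Prop :=
  ∀ p v, memo.get? p = some v → v = pvDL as bs p.1 p.2

theorem pvMemoOK_empty (as bs : List Char) : pvMemoOK as bs PySem.Dict.empty := by
  intro p v h
  simp [PySem.Dict.empty, PySem.Dict.get?] at h

theorem pvMemoOK_insert (as bs : List Char) (memo : PySem.Dict (Int × Int) Int)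
    (i j v : Int) (hm : pvMemoOK as bs memo) (hv : v = pvDL as bs i j) :
    pvMemoOK as bs (memo.insert (i, j) v) := by
  intro p w h
  rw [PySem.Dict.get?_insert] at h
  by_cases hp : p = (i, j)
  · rw [if_pos hp] at h
    cases h
    rw [hp]
    exact hv
  · rw [if_neg hp] at h
    exact hm p w h

theorem pvFinish (as bs : List Char) (i j v : Int) (memo : PySem.Dict (Int × Int) Int)
    (hm : pvMemoOK as bs memo) (hv : v = pvDL as bs i j) :
    v = pvDL as bs i j ∧ pvMemoOK as bs (memo.insert (i, j) v) :=
  ⟨hv, pvMemoOK_insert as bs memo i j v hm hv⟩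

theorem pvRec_spec (as bs : List Char) :
    ∀ (fuel : Nat) (i j : Int) (memo : PySem.Dict (Int × Int) Int),
    (i + j).toNat < fuel → pvMemoOK as bs memo →
    (pvRec as bs fuel i j memo).1 = pvDL as bs i j ∧ pvMemoOK as bs (pvRec as bs fuel i j memo).2 := by
  intro fuel
  induction fuel with
  | zero =>
    intro i j memo hn hm
    omega
  | succ n ih =>
    intro i j memo hn hm
    by_cases hi : i ≤ 0
    · rw [pvRec, pvDL, if_pos hi, if_pos hi]; exact ⟨rfl, hm⟩
    by_cases hj : j ≤ 0
    · rw [pvRec, pvDL, if_neg hi, if_pos hj, if_neg hi, if_pos hj]; exact ⟨rfl, hm⟩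
    rw [pvRec, if_neg hi, if_neg hj]
    cases hget : memo.get? (i, j) with
    | some v =>
      exact ⟨hm (i, j) v hget, hm⟩
    | none =>
      simp only []
      obtain ⟨e1, m1⟩ := ih (i-1) j memo (by omega) hm
      set q1 := pvRec as bs n (i-1) j memo with hq1
      obtain ⟨e2, m2⟩ := ih i (j-1) q1.2 (by omega) m1
      set q2 := pvRec as bs n i (j-1) q1.2 with hq2
      obtain ⟨e3, m3⟩ := ih (i-1) (j-1) q2.2 (by omega) m2
      set q3 := pvRec as bs n (i-1) (j-1) q2.2 with hq3
      have hDLij : pvDL as bs i j = pvStage as bs i j (pvDL as bs (i-1) j) (pvDL as bs i (j-1))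
          (pvDL as bs (i-1) (j-1)) (pvDL as bs (i-2) (j-2)) (pvDL as bs (i-3) (j-2))
          (pvDL as bs (i-2) (j-3)) := by
        conv_lhs => rw [pvDL, if_neg hi, if_neg hj]
      simp only [e1, e2, e3]
      by_cases c4 : i > 1 ∧ j > 1 ∧ PySem.List.pyGetD as (i-2) ' ' == PySem.List.pyGetD bs (j-1) ' '
          ∧ PySem.List.pyGetD as (i-1) ' ' == PySem.List.pyGetD bs (j-2) ' '
      · rw [if_pos c4]
        obtain ⟨e4, m4⟩ := ih (i-2) (j-2) q3.2 (by omega) m3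
        set q4 := pvRec as bs n (i-2) (j-2) q3.2 with hq4
        simp only [e4]
        by_cases c5 : i > 2 ∧ j > 1 ∧ PySem.List.pyGetD as (i-3) ' ' == PySem.List.pyGetD bs (j-1) ' '
            ∧ PySem.List.pyGetD as (i-1) ' ' == PySem.List.pyGetD bs (j-2) ' '
        · rw [if_pos c5]
          obtain ⟨e5, m5⟩ := ih (i-3) (j-2) q4.2 (by omega) m4
          set q5 := pvRec as bs n (i-3) (j-2) q4.2 with hq5
          simp only [e5]
          by_cases c6 : i > 1 ∧ j > 2 ∧ PySem.List.pyGetD as (i-1) ' ' == PySem.List.pyGetD bs (j-3) ' '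
              ∧ PySem.List.pyGetD as (i-2) ' ' == PySem.List.pyGetD bs (j-1) ' '
          · rw [if_pos c6]
            obtain ⟨e6, m6⟩ := ih (i-2) (j-3) q5.2 (by omega) m5
            set q6 := pvRec as bs n (i-2) (j-3) q5.2 with hq6
            simp only [e6]
            refine pvFinish as bs i j _ _ m6 ?_
            rw [hDLij]; simp only [pvStage]; rw [if_pos c4, if_pos c5, if_pos c6]
          · rw [if_neg c6]
            refine pvFinish as bs i j _ _ m5 ?_
            rw [hDLij]; simp only [pvStage]; rw [if_pos c4, if_pos c5, if_neg c6]
        · rw [if_neg c5]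
          by_cases c6 : i > 1 ∧ j > 2 ∧ PySem.List.pyGetD as (i-1) ' ' == PySem.List.pyGetD bs (j-3) ' '
              ∧ PySem.List.pyGetD as (i-2) ' ' == PySem.List.pyGetD bs (j-1) ' '
          · rw [if_pos c6]
            obtain ⟨e6, m6⟩ := ih (i-2) (j-3) q4.2 (by omega) m4
            set q6 := pvRec as bs n (i-2) (j-3) q4.2 with hq6
            simp only [e6]
            refine pvFinish as bs i j _ _ m6 ?_
            rw [hDLij]; simp only [pvStage]; rw [if_pos c4, if_neg c5, if_pos c6]
          · rw [if_neg c6]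
            refine pvFinish as bs i j _ _ m4 ?_
            rw [hDLij]; simp only [pvStage]; rw [if_pos c4, if_neg c5, if_neg c6]
      · rw [if_neg c4]
        by_cases c5 : i > 2 ∧ j > 1 ∧ PySem.List.pyGetD as (i-3) ' ' == PySem.List.pyGetD bs (j-1) ' '
            ∧ PySem.List.pyGetD as (i-1) ' ' == PySem.List.pyGetD bs (j-2) ' '
        · rw [if_pos c5]
          obtain ⟨e5, m5⟩ := ih (i-3) (j-2) q3.2 (by omega) m3
          set q5 := pvRec as bs n (i-3) (j-2) q3.2 with hq5
          simp only [e5]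
          by_cases c6 : i > 1 ∧ j > 2 ∧ PySem.List.pyGetD as (i-1) ' ' == PySem.List.pyGetD bs (j-3) ' '
              ∧ PySem.List.pyGetD as (i-2) ' ' == PySem.List.pyGetD bs (j-1) ' '
          · rw [if_pos c6]
            obtain ⟨e6, m6⟩ := ih (i-2) (j-3) q5.2 (by omega) m5
            set q6 := pvRec as bs n (i-2) (j-3) q5.2 with hq6
            simp only [e6]
            refine pvFinish as bs i j _ _ m6 ?_
            rw [hDLij]; simp only [pvStage]; rw [if_neg c4, if_pos c5, if_pos c6]
          · rw [if_neg c6]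
            refine pvFinish as bs i j _ _ m5 ?_
            rw [hDLij]; simp only [pvStage]; rw [if_neg c4, if_pos c5, if_neg c6]
        · rw [if_neg c5]
          by_cases c6 : i > 1 ∧ j > 2 ∧ PySem.List.pyGetD as (i-1) ' ' == PySem.List.pyGetD bs (j-3) ' '
              ∧ PySem.List.pyGetD as (i-2) ' ' == PySem.List.pyGetD bs (j-1) ' '
          · rw [if_pos c6]
            obtain ⟨e6, m6⟩ := ih (i-2) (j-3) q3.2 (by omega) m3
            set q6 := pvRec as bs n (i-2) (j-3) q3.2 with hq6
            simp only [e6]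
            refine pvFinish as bs i j _ _ m6 ?_
            rw [hDLij]; simp only [pvStage]; rw [if_neg c4, if_neg c5, if_pos c6]
          · rw [if_neg c6]
            refine pvFinish as bs i j _ _ m3 ?_
            rw [hDLij]; simp only [pvStage]; rw [if_neg c4, if_neg c5, if_neg c6]

theorem intermedia_alt_eq (a b : String) (threshold : Option Int) :
    intermedia_alt a b threshold =
      (match threshold with
       | some t => if pvDL a.toList b.toList a.toList.length b.toList.length <= t
           then some (pvDL a.toList b.toList a.toList.length b.toList.length) else none
       | none => none) := by
  have h := (pvRec_spec a.toList b.toList (a.toList.length + b.toList.length + 1)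
      a.toList.length b.toList.length PySem.Dict.empty (by omega) (pvMemoOK_empty a.toList b.toList)).1
  rw [intermedia_alt.eq_def]
  simp only [h]

-- ===== A side: dict-cell helper lemmas =====
theorem pvSetCell_get?_ne (d : PySem.Dict Int (PySem.Dict Int Int)) (i j v k : Int) (h : k ≠ i) :
    (pvSetCell d i j v).get? k = d.get? k := by
  rw [pvSetCell, PySem.Dict.get?_insert, if_neg h]

theorem pvGetCell_set_self (d : PySem.Dict Int (PySem.Dict Int Int)) (i j v : Int) :
    pvGetCell (pvSetCell d i j v) i j = v := by
  rw [pvGetCell, pvSetCell, PySem.Dict.getD_insert_self, PySem.Dict.getD_insert_self]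

theorem pvGetCell_set_row_ne (d : PySem.Dict Int (PySem.Dict Int Int)) (i j v l : Int) (h : l ≠ j) :
    pvGetCell (pvSetCell d i j v) i l = pvGetCell d i l := by
  rw [pvGetCell, pvSetCell, PySem.Dict.getD_insert_self, PySem.Dict.getD_insert, if_neg h, pvGetCell]

theorem pvGetCell_set_ne (d : PySem.Dict Int (PySem.Dict Int Int)) (i j v k l : Int) (h : k ≠ i) :
    pvGetCell (pvSetCell d i j v) k l = pvGetCell d k l := by
  rw [pvGetCell, pvSetCell, PySem.Dict.getD_insert, if_neg h, pvGetCell]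

theorem pvGetCell_congr (d d' : PySem.Dict Int (PySem.Dict Int Int)) (k l : Int)
    (h : d'.get? k = d.get? k) : pvGetCell d' k l = pvGetCell d k l := by
  simp only [pvGetCell, PySem.Dict.getD_eq_get?_getD, h]

theorem pvAStep_get?_ne (as bs : List Char) (i : Int) (d : PySem.Dict Int (PySem.Dict Int Int))
    (j k : Int) (h : k ≠ i) : (pvAStep as bs i d j).get? k = d.get? k := by
  rw [pvAStep]
  split_ifs <;> simp only [pvSetCell_get?_ne _ _ _ _ _ h]

theorem pvAStep_cell_ne (as bs : List Char) (i : Int) (d : PySem.Dict Int (PySem.Dict Int Int))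
    (j l : Int) (h : l ≠ j) : pvGetCell (pvAStep as bs i d j) i l = pvGetCell d i l := by
  rw [pvAStep]
  split_ifs <;> simp only [pvGetCell_set_row_ne _ _ _ _ _ h]

-- the invariant of A's table-filling loops
def pvInv (as bs : List Char) (D : PySem.Dict Int (PySem.Dict Int Int)) (i : Int) : Prop :=
  (∀ k j : Int, 0 <= k → k < i → 0 <= j → j <= (bs.length : Int) →
      pvGetCell D k j = pvDL as bs k j) ∧
  (∀ k : Int, i <= k → k <= (as.length : Int) →
      D.get? k = some (PySem.Dict.empty.insert 0 k))

-- one cell update of A computes the recurrence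
theorem pvAStep_cell (as bs : List Char) (i j : Int)
    (D D' : PySem.Dict Int (PySem.Dict Int Int))
    (hInv : pvInv as bs D i)
    (hi1 : 1 <= i) (hj1 : 1 <= j) (hj2 : j <= (bs.length : Int))
    (hne : ∀ k, k ≠ i → D'.get? k = D.get? k)
    (hcur : pvGetCell D' i (j-1) = pvDL as bs i (j-1)) :
    pvGetCell (pvAStep as bs i D' j) i j = pvDL as bs i j := by
  have hrow : ∀ k l : Int, 0 <= k → k < i → 0 <= l → l <= (bs.length : Int) →
      pvGetCell D' k l = pvDL as bs k l := by
    intro k l hk0 hk1 hl0 hl1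
    rw [pvGetCell_congr D D' k l (hne k (by omega)), hInv.1 k l hk0 hk1 hl0 hl1]
  have r1 : pvGetCell D' (i-1) j = pvDL as bs (i-1) j :=
    hrow _ _ (by omega) (by omega) (by omega) (by omega)
  have r3 : pvGetCell D' (i-1) (j-1) = pvDL as bs (i-1) (j-1) :=
    hrow _ _ (by omega) (by omega) (by omega) (by omega)
  rw [pvAStep]
  simp only [r1, r3, hcur]
  conv_rhs => rw [pvDL, if_neg (by omega : ¬ i <= 0), if_neg (by omega : ¬ j <= 0)]
  simp only [pvStage]
  split_ifs
  all_goals (repeat (first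
    | rw [pvGetCell_set_self]
    | rw [pvGetCell_set_ne _ _ _ _ _ _ (by omega)]
    | rw [hrow _ _ (by omega) (by omega) (by omega) (by omega)]))

theorem pvAInner (as bs : List Char) (i : Int)
    (D : PySem.Dict Int (PySem.Dict Int Int))
    (hInv : pvInv as bs D i) (hi1 : 1 <= i) (hi2 : i <= (as.length : Int)) :
    ∀ (jn : Nat) (j0 : Int) (D' : PySem.Dict Int (PySem.Dict Int Int)),
    j0 = (bs.length : Int) + 1 - jn → 1 <= j0 →
    (∀ k, k ≠ i → D'.get? k = D.get? k) →
    (∀ j, 0 <= j → j < j0 → pvGetCell D' i j = pvDL as bs i j) →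
    (∀ k, k ≠ i → ((PySem.List.pyRange j0 ((bs.length : Int)+1) 1).foldl (pvAStep as bs i) D').get? k = D.get? k) ∧
    (∀ j, 0 <= j → j <= (bs.length : Int) →
      pvGetCell ((PySem.List.pyRange j0 ((bs.length : Int)+1) 1).foldl (pvAStep as bs i) D') i j = pvDL as bs i j) := by
  intro jn
  induction jn with
  | zero =>
    intro j0 D' hj0 hj1 hne hcell
    rw [PySem.List.pyRange_one_eq_nil (by omega)]
    simp only [List.foldl_nil]
    exact ⟨hne, fun j h0 h1 => hcell j h0 (by omega)⟩
  | succ jn ih =>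
    intro j0 D' hj0 hj1 hne hcell
    have hj2 : j0 <= (bs.length : Int) := by omega
    rw [PySem.List.pyRange_one_cons (by omega)]
    simp only [List.foldl_cons]
    apply ih (j0+1) (pvAStep as bs i D' j0) (by omega) (by omega)
    · intro k hk
      rw [pvAStep_get?_ne as bs i D' j0 k hk, hne k hk]
    · intro j h0 h1
      by_cases hje : j = j0
      · subst hje
        exact pvAStep_cell as bs i j D D' hInv hi1 hj1 hj2 hne
          (hcell (j-1) (by omega) (by omega))
      · rw [pvAStep_cell_ne as bs i D' j0 j hje, hcell j h0 (by omega)]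

theorem pvAOuter (as bs : List Char) :
    ∀ (n : Nat) (i0 : Int) (D : PySem.Dict Int (PySem.Dict Int Int)),
    i0 = (as.length : Int) + 1 - n → 1 <= i0 → pvInv as bs D i0 →
    pvInv as bs ((PySem.List.pyRange i0 ((as.length : Int)+1) 1).foldl
      (fun d i => (PySem.List.pyRange 1 ((bs.length : Int)+1) 1).foldl (pvAStep as bs i) d) D)
      ((as.length : Int) + 1) := by
  intro n
  induction n with
  | zero =>
    intro i0 D hi0 hi1 hInv
    rw [PySem.List.pyRange_one_eq_nil (a := i0) (b := (as.length : Int)+1) (by omega)]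
    simp only [List.foldl_nil]
    have : i0 = (as.length : Int) + 1 := by omega
    rwa [this] at hInv
  | succ n ih =>
    intro i0 D hi0 hi1 hInv
    have hi2 : i0 <= (as.length : Int) := by omega
    rw [PySem.List.pyRange_one_cons (a := i0) (b := (as.length : Int)+1) (by omega)]
    simp only [List.foldl_cons]
    have hcell0 : ∀ j : Int, 0 <= j → j < 1 → pvGetCell D i0 j = pvDL as bs i0 j := by
      intro j h0 h1
      have hj : j = 0 := by omega
      subst hj
      rw [pvGetCell, PySem.Dict.getD_eq_get?_getD (d := D) (k := i0), hInv.2 i0 (le_refl _) hi2]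
      simp only [Option.getD_some]
      rw [PySem.Dict.getD_insert_self, pvDL_base as bs i0 hi1]
    obtain ⟨hA, hB⟩ := pvAInner as bs i0 D hInv hi1 hi2 bs.length 1 D (by omega) (by omega)
      (fun k _ => rfl) hcell0
    apply ih (i0+1) _ (by omega) (by omega)
    constructor
    · intro k j hk0 hk1 hj0 hj1
      by_cases hke : k = i0
      · subst hke; exact hB j hj0 hj1
      · rw [pvGetCell_congr D _ k j (hA k hke), hInv.1 k j hk0 (by omega) hj0 hj1]
    · intro k hk1 hk2
      rw [hA k (by omega), hInv.2 k (by omega) hk2]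

theorem pvInit1 :
    ∀ (n : Nat) (k : Int), 0 <= k → k < (n : Int) →
    ((PySem.List.pyRange 0 (n : Int) 1).foldl
      (fun d i => d.insert i (PySem.Dict.empty.insert 0 i))
      (PySem.Dict.empty : PySem.Dict Int (PySem.Dict Int Int))).get? k
      = some (PySem.Dict.empty.insert 0 k) := by
  intro n
  induction n with
  | zero => intro k h0 h1; omega
  | succ n ih =>
    intro k h0 h1
    have hc : ((n+1 : Nat) : Int) = (n : Int) + 1 := by push_cast; ring
    rw [hc, PySem.List.pyRange_one_succ_right (by omega), List.foldl_append]
    simp only [List.foldl_cons, List.foldl_nil]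
    rw [PySem.Dict.get?_insert]
    by_cases hk : k = (n : Int)
    · rw [if_pos hk, hk]
    · rw [if_neg hk]; exact ih k h0 (by omega)

theorem pvInit2a (l : List Int) (D : PySem.Dict Int (PySem.Dict Int Int)) (k : Int) (h : k ≠ 0) :
    (l.foldl (fun d j => d.insert 0 ((d.getD 0 PySem.Dict.empty).insert j j)) D).get? k = D.get? k := by
  induction l generalizing D with
  | nil => rfl
  | cons x t ih => simp only [List.foldl_cons]; rw [ih, PySem.Dict.get?_insert, if_neg h]

theorem pvInit2b :
    ∀ (n : Nat) (D : PySem.Dict Int (PySem.Dict Int Int)) (j : Int), 0 <= j → j < (n : Int) →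
    (((PySem.List.pyRange 0 (n : Int) 1).foldl
      (fun d j => d.insert 0 ((d.getD 0 PySem.Dict.empty).insert j j)) D).getD 0 PySem.Dict.empty).getD j 0 = j := by
  intro n
  induction n with
  | zero => intro D j h0 h1; omega
  | succ n ih =>
    intro D j h0 h1
    have hc : ((n+1 : Nat) : Int) = (n : Int) + 1 := by push_cast; ring
    rw [hc, PySem.List.pyRange_one_succ_right (by omega), List.foldl_append]
    simp only [List.foldl_cons, List.foldl_nil]
    rw [PySem.Dict.getD_insert_self, PySem.Dict.getD_insert]
    by_cases hj : j = (n : Int)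
    · rw [if_pos hj, hj]
    · rw [if_neg hj]; exact ih D j h0 (by omega)

theorem intermedia_eq (a b : String) (threshold : Option Int) :
    intermedia a b threshold =
      (match threshold with
       | some t => if pvDL a.toList b.toList a.toList.length b.toList.length <= t
           then some (pvDL a.toList b.toList a.toList.length b.toList.length) else none
       | none => none) := by
  have hcast1 : ((a.toList.length + 1 : Nat) : Int) = (a.toList.length : Int) + 1 := by push_cast; ring
  have hcast2 : ((b.toList.length + 1 : Nat) : Int) = (b.toList.length : Int) + 1 := by push_cast; ring
  have h2 : pvInv a.toList b.toList
      ((PySem.List.pyRange 0 ((b.toList.length : Int)+1) 1).foldl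
        (fun d j => d.insert 0 ((d.getD 0 PySem.Dict.empty).insert j j))
        ((PySem.List.pyRange 0 ((a.toList.length : Int)+1) 1).foldl
          (fun d i => d.insert i (PySem.Dict.empty.insert 0 i)) PySem.Dict.empty)) 1 := by
    constructor
    · intro k j hk0 hk1 hj0 hj1
      have hk : k = 0 := by omega
      subst hk
      rw [pvGetCell, pvDL_zero]
      have := pvInit2b (b.toList.length + 1)
        ((PySem.List.pyRange 0 ((a.toList.length : Int)+1) 1).foldl
          (fun d i => d.insert i (PySem.Dict.empty.insert 0 i)) PySem.Dict.empty)
        j hj0 (by omega)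
      rwa [hcast2] at this
    · intro k hk1 hk2
      rw [pvInit2a _ _ k (by omega)]
      have := pvInit1 (a.toList.length + 1) k (by omega) (by omega)
      rw [hcast1] at this
      exact this
  have h3 := pvAOuter a.toList b.toList a.toList.length 1 _ (by omega) (by omega) h2
  have hfin := h3.1 (a.toList.length : Int) (b.toList.length : Int)
    (by omega) (by omega) (by omega) (le_refl _)
  rw [intermedia.eq_def]
  simp only [hfin]

-- ===== VERDICT (by name: the statement is the Claim_ definition above) =====
theorem intermedia_spec : Claim_equal_intermedia := by
  intro a b threshold _ _
  unfold Spec_intermedia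
  rw [intermedia_eq, intermedia_alt_eq]
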